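-- pv_equiv track=rewrite | github.com/mykhailo-portfolio/email_parser | src/app/utils/filters.py | _first_hit_indices
-- ===== SOURCE A (Python) =====
-- from typing import List, Dict, Tuple
--
-- def _first_hit_indices(text_norm: str, pos_norm: list[str], neg_norm: list[str]) -> Tuple[int, int]:
--     """
--     Find first occurrence indices for any POS and any NEG phrase.
--     Returns (-1, -1) if not found.
--     """
--     pos_idx = -1
--     for p in pos_norm:
--         i = text_norm.find(p)
--         if i != -1 and (pos_idx == -1 or i < pos_idx):
--             pos_idx = i
--
--     neg_idx = -1
--     for p in neg_norm:
--         i = text_norm.find(p)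
--         if i != -1 and (neg_idx == -1 or i < neg_idx):
--             neg_idx = i
--
--     return pos_idx, neg_idx
-- ===== SOURCE B (Python) =====
-- def _first_hit_indices(text_norm: str, pos_norm: list[str], neg_norm: list[str]):
--     """
--     Scan the text left to right once per group: the first position at which
--     any phrase of the group starts is the group's answer (-1 if none).
--     """
--     def _scan(phrases):
--         for i in range(len(text_norm) + 1):
--             for p in phrases:
--                 if text_norm.startswith(p, i):
--                     return i
--         return -1
--     return _scan(pos_norm), _scan(neg_norm)
-- ===== Notes on version B (the rewrite author's own statement) =====
-- stated objective: faster
-- what changed: A runs str.find over the whole text for every phrase and keeps a running minimum; B scans text positions left to right and stops at the first position where any phrase of the group starts, so it never looks past the earliest hit.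
import Mathlib
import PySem

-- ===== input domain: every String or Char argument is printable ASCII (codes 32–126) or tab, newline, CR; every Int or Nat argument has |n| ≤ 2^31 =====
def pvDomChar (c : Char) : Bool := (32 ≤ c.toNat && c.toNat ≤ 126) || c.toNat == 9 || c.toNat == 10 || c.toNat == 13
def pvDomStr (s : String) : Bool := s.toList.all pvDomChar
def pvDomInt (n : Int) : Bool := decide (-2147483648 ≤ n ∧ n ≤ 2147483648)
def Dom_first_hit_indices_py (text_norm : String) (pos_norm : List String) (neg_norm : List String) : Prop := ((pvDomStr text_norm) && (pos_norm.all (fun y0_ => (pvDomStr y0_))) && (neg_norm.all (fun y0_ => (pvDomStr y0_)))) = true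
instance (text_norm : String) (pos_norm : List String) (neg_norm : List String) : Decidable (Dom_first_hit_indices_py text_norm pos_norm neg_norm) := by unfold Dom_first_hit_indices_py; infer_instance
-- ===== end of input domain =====

-- B replaces A's phrase-outer loop (running minimum of per-phrase str.find) by a
-- position-outer scan returning the first text position where any phrase starts
-- (alternative decomposition; same asymptotic cost).


-- ===== PORT A =====
-- the per-group loop of A: running best (smallest non-(-1)) str.find result
def pvBestFind (text_norm : String) (phrases : List String) : Int :=
  phrases.foldl (fun idx p =>
    let i := PySem.Str.find text_norm p
    if i ≠ -1 ∧ (idx = -1 ∨ i < idx) then i else idx) (-1)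

def first_hit_indices_py (text_norm : String) (pos_norm : List String) (neg_norm : List String) : Int × Int :=
  (pvBestFind text_norm pos_norm, pvBestFind text_norm neg_norm)

-- ===== PORT B =====
-- the per-group loop of B: first position j (0..len) where some phrase starts
-- (text_norm.startswith(p, j) for 0 ≤ j ≤ len is exactly 'p.toList is a prefix of drop j')
def pvScanHit (text_norm : String) (phrases : List String) : Int :=
  match (List.range (text_norm.toList.length + 1)).find?
      (fun j => phrases.any (fun p => p.toList.isPrefixOf (text_norm.toList.drop j))) with
  | some j => (j : Int)
  | none => -1

def first_hit_indices_py_alt (text_norm : String) (pos_norm : List String) (neg_norm : List String) : Int × Int :=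
  (pvScanHit text_norm pos_norm, pvScanHit text_norm neg_norm)

-- ===== PRECONDITION & SPEC =====
def Spec_first_hit_indices_py (text_norm : String) (pos_norm : List String) (neg_norm : List String) (out : Int × Int) : Prop := out = first_hit_indices_py_alt text_norm pos_norm neg_norm
instance (text_norm : String) (pos_norm : List String) (neg_norm : List String) (out : Int × Int) : Decidable (Spec_first_hit_indices_py text_norm pos_norm neg_norm out) := by unfold Spec_first_hit_indices_py; infer_instance

-- ===== CLAIM (what is proved, stated in full; the proofs are below) =====
def Claim_equal_first_hit_indices_py : Prop := ∀ (text_norm : String) (pos_norm : List String) (neg_norm : List String), Dom_first_hit_indices_py text_norm pos_norm neg_norm → Spec_first_hit_indices_py text_norm pos_norm neg_norm (first_hit_indices_py text_norm pos_norm neg_norm)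

-- ===== LEMMAS AND PROOFS =====

-- a phrase that starts at position j has its first occurrence (str.find) at or before j
theorem pvFind_le_of_prefix (s p : List Char) (j : Nat) (h : p <+: s.drop j) :
    PySem.Chars.find s p ≠ -1 ∧ PySem.Chars.find s p ≤ (j : Int) := by
  have hin : PySem.Chars.isIn p s = true :=
    (PySem.Chars.exists_prefix_drop_iff_isIn p s).mp ⟨j, h⟩
  have hinf : p <:+: s := (PySem.Chars.isIn_iff_infix p s).mp hin
  have hne : PySem.Chars.find s p ≠ -1 := (PySem.Chars.find_ne_neg_one_iff s p).mpr hinf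
  have hnn : 0 ≤ PySem.Chars.find s p := (PySem.Chars.find_nonneg_iff s p).mpr hinf
  refine ⟨hne, ?_⟩
  have hsp := (PySem.Chars.find_spec hnn).2
  by_contra hlt
  push Not at hlt
  exact hsp j (by omega) h

-- proof-side name for A's loop body
def pvStep (s : List Char) (idx : Int) (p : String) : Int :=
  let i := PySem.Chars.find s p.toList
  if i ≠ -1 ∧ (idx = -1 ∨ i < idx) then i else idx

-- characterization of A's fold from an arbitrary accumulator
theorem pvFold_char (s : List Char) (ps : List String) : ∀ acc : Int,
    (ps.foldl (pvStep s) acc = acc ∨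
      ∃ p ∈ ps, ps.foldl (pvStep s) acc = PySem.Chars.find s p.toList) ∧
    (∀ p ∈ ps, PySem.Chars.find s p.toList ≠ -1 →
      ps.foldl (pvStep s) acc ≠ -1 ∧ ps.foldl (pvStep s) acc ≤ PySem.Chars.find s p.toList) ∧
    (acc ≠ -1 → ps.foldl (pvStep s) acc ≠ -1 ∧ ps.foldl (pvStep s) acc ≤ acc) := by
  induction ps with
  | nil => intro acc; simp
  | cons p ps ih =>
    intro acc
    simp only [List.foldl_cons]
    by_cases hg : PySem.Chars.find s p.toList ≠ -1 ∧ (acc = -1 ∨ PySem.Chars.find s p.toList < acc)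
    · have hstep : pvStep s acc p = PySem.Chars.find s p.toList := by
        simp only [pvStep, if_pos hg]
      rw [hstep]
      obtain ⟨h1, h2, h3⟩ := ih (PySem.Chars.find s p.toList)
      refine ⟨?_, ?_, ?_⟩
      · rcases h1 with h | ⟨q, hq, hqe⟩
        · exact Or.inr ⟨p, by simp, h⟩
        · exact Or.inr ⟨q, by simp [hq], hqe⟩
      · intro q hq hqne
        rcases List.mem_cons.mp hq with rfl | hq
        · exact h3 hg.1
        · exact h2 q hq hqne
      · intro hacc
        obtain ⟨hr1, hr2⟩ := h3 hg.1
        rcases hg.2 with h | h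
        · exact absurd h hacc
        · exact ⟨hr1, by omega⟩
    · have hstep : pvStep s acc p = acc := by
        simp only [pvStep, if_neg hg]
      rw [hstep]
      obtain ⟨h1, h2, h3⟩ := ih acc
      refine ⟨?_, ?_, ?_⟩
      · rcases h1 with h | ⟨q, hq, hqe⟩
        · exact Or.inl h
        · exact Or.inr ⟨q, by simp [hq], hqe⟩
      · intro q hq hqne
        rcases List.mem_cons.mp hq with rfl | hq
        · push Not at hg
          have hacc : acc ≠ -1 := by
            intro hc
            exact absurd (hg hqne) (by simp [hc])
          have hai : acc ≤ PySem.Chars.find s q.toList := by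
            have := hg hqne; omega
          obtain ⟨hr1, hr2⟩ := h3 hacc
          exact ⟨hr1, by omega⟩
        · exact h2 q hq hqne
      · exact h3

-- first index below k satisfying pred is what List.find? on a range returns
theorem pvFind?_range'_some (pred : Nat → Bool) (m : Nat) : ∀ (a k : Nat), a ≤ m → m < a + k →
    pred m = true → (∀ j, a ≤ j → j < m → pred j = false) →
    (List.range' a k).find? pred = some m := by
  intro a k
  induction k generalizing a with
  | zero => intro h1 h2; omega
  | succ k ih =>
    intro h1 h2 hp hmin
    rw [List.range'_succ]
    by_cases ha : a = m
    · subst ha; simp [hp]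
    · have : pred a = false := hmin a le_rfl (by omega)
      simp only [List.find?_cons, this]
      exact ih (a + 1) (by omega) (by omega) hp (fun j hj hjm => hmin j (by omega) hjm)

theorem pvFind?_range_some (pred : Nat → Bool) (k m : Nat) (hm : m < k) (hp : pred m = true)
    (hmin : ∀ j < m, pred j = false) : (List.range k).find? pred = some m := by
  rw [List.range_eq_range']
  exact pvFind?_range'_some pred m 0 k (by omega) (by omega) hp (fun j _ hj => hmin j hj)

-- the per-group equivalence: A's running minimum of finds = B's first matching position
theorem pvGroup_eq (t : String) (ps : List String) : pvBestFind t ps = pvScanHit t ps := by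
  have hbest : pvBestFind t ps = ps.foldl (pvStep t.toList) (-1) := by
    unfold pvBestFind
    congr 1
  set s := t.toList with hs
  set r := ps.foldl (pvStep s) (-1) with hr
  obtain ⟨h1, h2, _⟩ := pvFold_char s ps (-1)
  rw [hbest]
  by_cases hcase : r = -1
  · -- no phrase occurs: every position check fails
    have hall : ∀ p ∈ ps, PySem.Chars.find s p.toList = -1 := by
      intro p hp
      by_contra hne
      exact (h2 p hp hne).1 hcase
    have : (List.range (s.length + 1)).find?
        (fun j => ps.any (fun p => p.toList.isPrefixOf (s.drop j))) = none := by
      rw [List.find?_eq_none]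
      intro j _ hj
      simp only [List.any_eq_true] at hj
      obtain ⟨p, hp, hpre⟩ := hj
      have hpre' : p.toList <+: s.drop j := List.isPrefixOf_iff_prefix.mp hpre
      exact (pvFind_le_of_prefix s p.toList j hpre').1 (hall p hp)
    simp only [pvScanHit, ← hs, this]
    exact hcase
  · -- r is the minimum find; it is the first matching position
    have hrmem : ∃ p ∈ ps, r = PySem.Chars.find s p.toList := by
      rcases h1 with h | h
      · exact absurd h hcase
      · exact h
    obtain ⟨p₀, hp₀, hre⟩ := hrmem
    have hnn : 0 ≤ r := by
      have := PySem.Chars.neg_one_le_find s p₀.toList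
      omega
    have hlen : r ≤ (s.length : Int) := hre ▸ PySem.Chars.find_le_length s p₀.toList
    have hpred : (fun j => ps.any (fun p => p.toList.isPrefixOf (s.drop j))) r.toNat = true := by
      have hsp := (PySem.Chars.find_spec (s := s) (sub := p₀.toList) (by omega : 0 ≤ PySem.Chars.find s p₀.toList)).1
      simp only [List.any_eq_true]
      exact ⟨p₀, hp₀, List.isPrefixOf_iff_prefix.mpr (by rw [hre]; exact hsp)⟩
    have hmin : ∀ j < r.toNat, (fun j => ps.any (fun p => p.toList.isPrefixOf (s.drop j))) j = false := by
      intro j hj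
      by_contra hc
      simp only [Bool.not_eq_false, List.any_eq_true] at hc
      obtain ⟨q, hq, hqpre⟩ := hc
      have hqpre' : q.toList <+: s.drop j := List.isPrefixOf_iff_prefix.mp hqpre
      obtain ⟨hqne, hqle⟩ := pvFind_le_of_prefix s q.toList j hqpre'
      have := (h2 q hq hqne).2
      omega
    have hfind := pvFind?_range_some _ (s.length + 1) r.toNat (by omega) hpred hmin
    simp only [pvScanHit, ← hs, hfind]
    omega

-- ===== VERDICT (by name: the statement is the Claim_ definition above) =====
theorem first_hit_indices_py_spec : Claim_equal_first_hit_indices_py := by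
  intro t pos neg _
  unfold Spec_first_hit_indices_py first_hit_indices_py first_hit_indices_py_alt
  rw [pvGroup_eq t pos, pvGroup_eq t neg]
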